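-- pv_equiv track=rewrite | github.com/apolosan/codebase_state_manager_mcp | src/mcp_server/services/state_service.py | _summarize_hash_mismatch
-- ===== SOURCE A (Python) =====
-- from typing import Dict, Optional
--
-- def _summarize_hash_mismatch(
--
--     rebuilt_hashes: Dict[str, str],
--     expected_hashes: Dict[str, str],
-- ) -> str:
--     """Build a compact mismatch summary for diagnostics."""
--     rebuilt_paths = set(rebuilt_hashes)
--     expected_paths = set(expected_hashes)
--     missing = sorted(expected_paths - rebuilt_paths)
--     extra = sorted(rebuilt_paths - expected_paths)
--     changed = sorted(
--         path
--         for path in rebuilt_paths & expected_paths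
--         if rebuilt_hashes[path] != expected_hashes[path]
--     )
--     details = [
--         f"missing={len(missing)}",
--         f"extra={len(extra)}",
--         f"changed={len(changed)}",
--     ]
--     samples = []
--     if missing:
--         samples.append(f"missing_sample={missing[:3]}")
--     if extra:
--         samples.append(f"extra_sample={extra[:3]}")
--     if changed:
--         samples.append(f"changed_sample={changed[:3]}")
--     return ", ".join(details + samples)
-- ===== SOURCE B (Python) =====
-- def _summarize_hash_mismatch(rebuilt_hashes, expected_hashes):
--     """One pass over the sorted key union with Optional lookups, buckets kept in a
--     name-keyed table, and the output built by two comprehensions over that table."""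
--     buckets = {"missing": [], "extra": [], "changed": []}
--     for path in sorted(set(rebuilt_hashes) | set(expected_hashes)):
--         r = rebuilt_hashes.get(path)
--         e = expected_hashes.get(path)
--         if r is None:
--             buckets["missing"].append(path)
--         elif e is None:
--             buckets["extra"].append(path)
--         elif r != e:
--             buckets["changed"].append(path)
--     counts = [f"{name}={len(lst)}" for name, lst in buckets.items()]
--     samples = [f"{name}_sample={lst[:3]}" for name, lst in buckets.items() if lst]
--     return ", ".join(counts + samples)
-- ===== Notes on version B (the rewrite author's own statement) =====
-- stated objective: alternative
-- what changed: Replaces A's three separate set-difference/intersection passes (each sorted independently) with a single pass over the sorted union of all keys that classifies each key via Optional .get lookups into a name-keyed bucket table, the output then built by two comprehensions over that table.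
import Mathlib
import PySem

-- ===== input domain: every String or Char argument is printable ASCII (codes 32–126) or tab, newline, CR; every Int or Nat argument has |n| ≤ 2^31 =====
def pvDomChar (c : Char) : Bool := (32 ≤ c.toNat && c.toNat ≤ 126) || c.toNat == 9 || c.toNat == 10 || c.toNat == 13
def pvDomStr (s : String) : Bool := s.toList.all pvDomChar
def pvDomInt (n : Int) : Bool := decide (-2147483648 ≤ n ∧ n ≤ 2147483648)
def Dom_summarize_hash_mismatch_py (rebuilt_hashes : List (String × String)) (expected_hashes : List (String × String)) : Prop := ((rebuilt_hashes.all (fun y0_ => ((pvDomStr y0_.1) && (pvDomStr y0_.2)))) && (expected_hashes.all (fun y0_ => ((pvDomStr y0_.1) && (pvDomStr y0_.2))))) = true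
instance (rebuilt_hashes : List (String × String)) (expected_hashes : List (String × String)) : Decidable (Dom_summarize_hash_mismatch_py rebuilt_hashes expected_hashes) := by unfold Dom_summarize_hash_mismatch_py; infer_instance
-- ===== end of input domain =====

-- B replaces A's three set-difference/intersection passes (each sorted separately) with ONE pass
-- over the sorted key union, classifying each key via Optional lookups into a name-keyed bucket
-- table, and builds the output by two comprehensions over that table (objective: alternative).

-- ===== PORT A =====
-- Python repr of one ASCII string in A's f-strings: quote choice and escaping, exact on the
-- printable-ASCII+tab/newline/CR domain
def pvReprChar (q c : Char) : List Char :=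
  if c = '\\' then ['\\', '\\']
  else if c = q then ['\\', q]
  else if c = '\t' then ['\\', 't']
  else if c = '\n' then ['\\', 'n']
  else if c = '\r' then ['\\', 'r']
  else [c]

def pvReprStr (s : String) : String :=
  let cs := s.toList
  let q : Char := if cs.contains '\'' && !(cs.contains '"') then '"' else '\''
  String.ofList ([q] ++ cs.flatMap (pvReprChar q) ++ [q])

-- Python repr of a list of strings, as printed inside A's f-strings
def pvReprList (xs : List String) : String :=
  "[" ++ PySem.Str.join ", " (xs.map pvReprStr) ++ "]"

def summarize_hash_mismatch_py (rebuilt_hashes : List (String × String)) (expected_hashes : List (String × String)) : String :=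
  let rd := PySem.Dict.ofList rebuilt_hashes
  let ed := PySem.Dict.ofList expected_hashes
  let rebuilt_paths : PySem.Set String := PySem.Set.ofList rd.keys
  let expected_paths : PySem.Set String := PySem.Set.ofList ed.keys
  let missing := PySem.List.sorted (PySem.Set.diff expected_paths rebuilt_paths) (fun x => x) false
  let extra := PySem.List.sorted (PySem.Set.diff rebuilt_paths expected_paths) (fun x => x) false
  let changed := PySem.List.sorted ((PySem.Set.inter rebuilt_paths expected_paths).filter
      (fun p => rd.getD p "" != ed.getD p "")) (fun x => x) false
  let details := ["missing=" ++ PySem.Int.toStr (missing.length : Int),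
                  "extra=" ++ PySem.Int.toStr (extra.length : Int),
                  "changed=" ++ PySem.Int.toStr (changed.length : Int)]
  let samples : List String := []
  let samples := if missing.isEmpty then samples
                 else samples ++ ["missing_sample=" ++ pvReprList (PySem.List.slice missing none (some 3))]
  let samples := if extra.isEmpty then samples
                 else samples ++ ["extra_sample=" ++ pvReprList (PySem.List.slice extra none (some 3))]
  let samples := if changed.isEmpty then samples
                 else samples ++ ["changed_sample=" ++ pvReprList (PySem.List.slice changed none (some 3))]
  PySem.Str.join ", " (details ++ samples)

-- ===== PORT B =====
-- B's own repr of one string: recursive escaper over the character list (exact on the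
-- printable-ASCII+tab/newline/CR domain), Prop-level quote choice
def pvEsc (q : Char) : List Char → List Char
  | [] => []
  | c :: rest =>
    (if c = '\\' then ['\\', '\\']
     else if c = q then ['\\', q]
     else if c = '\t' then ['\\', 't']
     else if c = '\n' then ['\\', 'n']
     else if c = '\r' then ['\\', 'r']
     else [c]) ++ pvEsc q rest

def pvShow (s : String) : String :=
  let cs := s.toList
  let q : Char := if '\'' ∈ cs ∧ '"' ∉ cs then '"' else '\''
  String.ofList (q :: (pvEsc q cs ++ [q]))

def pvShowList (xs : List String) : String :=
  "[" ++ PySem.Str.join ", " (xs.map pvShow) ++ "]"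

-- append path to the bucket called name (buckets is B's dict name → list, as an assoc list)
def pvAppendTo (bs : List (String × List String)) (name p : String) : List (String × List String) :=
  bs.map (fun b => if b.1 = name then (b.1, b.2 ++ [p]) else b)

-- B's loop body: classify one key of the union by its two Optional lookups
def pvStep (rd ed : PySem.Dict String String) (bs : List (String × List String)) (p : String) :
    List (String × List String) :=
  match rd.get? p with
  | none => pvAppendTo bs "missing" p
  | some rv =>
    match ed.get? p with
    | none => pvAppendTo bs "extra" p
    | some ev => if rv ≠ ev then pvAppendTo bs "changed" p else bs

def summarize_hash_mismatch_py_alt (rebuilt_hashes : List (String × String)) (expected_hashes : List (String × String)) : String :=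
  let rd := PySem.Dict.ofList rebuilt_hashes
  let ed := PySem.Dict.ofList expected_hashes
  let all_paths := PySem.List.sorted
      (PySem.Set.union (PySem.Set.ofList rd.keys) (PySem.Set.ofList ed.keys)) (fun x => x) false
  let buckets := all_paths.foldl (pvStep rd ed)
      [("missing", []), ("extra", []), ("changed", [])]
  let counts := buckets.map (fun b => b.1 ++ "=" ++ PySem.Int.toStr (b.2.length : Int))
  let samples := (buckets.filter (fun b => !b.2.isEmpty)).map
      (fun b => b.1 ++ "_sample=" ++ pvShowList (PySem.List.slice b.2 none (some 3)))
  PySem.Str.join ", " (counts ++ samples)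

-- ===== PRECONDITION & SPEC =====
def Spec_summarize_hash_mismatch_py (rebuilt_hashes : List (String × String)) (expected_hashes : List (String × String)) (out : String) : Prop := out = summarize_hash_mismatch_py_alt rebuilt_hashes expected_hashes
instance (rebuilt_hashes : List (String × String)) (expected_hashes : List (String × String)) (out : String) : Decidable (Spec_summarize_hash_mismatch_py rebuilt_hashes expected_hashes out) := by unfold Spec_summarize_hash_mismatch_py; infer_instance

-- ===== CLAIM =====
def Claim_equal_summarize_hash_mismatch_py : Prop := ∀ (rebuilt_hashes : List (String × String)) (expected_hashes : List (String × String)), Dom_summarize_hash_mismatch_py rebuilt_hashes expected_hashes → Spec_summarize_hash_mismatch_py rebuilt_hashes expected_hashes (summarize_hash_mismatch_py rebuilt_hashes expected_hashes)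

-- ===== LEMMAS AND PROOFS =====

-- the two repr implementations agree
theorem pvEsc_eq_flatMap (q : Char) (cs : List Char) : pvEsc q cs = cs.flatMap (pvReprChar q) := by
  induction cs with
  | nil => rfl
  | cons c rest ih => simp [pvEsc, pvReprChar, ih]

theorem pvShow_eq_pvReprStr (s : String) : pvShow s = pvReprStr s := by
  have hq : (if '\'' ∈ s.toList ∧ '"' ∉ s.toList then '"' else '\'') =
      (if s.toList.contains '\'' && !(s.toList.contains '"') then '"' else '\'') := by
    by_cases h1 : '\'' ∈ s.toList <;> by_cases h2 : '"' ∈ s.toList <;> simp [h1, h2]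
  simp [pvShow, pvReprStr, pvEsc_eq_flatMap, hq]

theorem pvShowList_eq_pvReprList (xs : List String) : pvShowList xs = pvReprList xs := by
  unfold pvShowList pvReprList
  rw [List.map_congr_left (fun s _ => pvShow_eq_pvReprStr s)]

-- B's bucket fold unfolds to three filters over the traversed list
theorem pvStep_foldl (rd ed : PySem.Dict String String) (l : List String)
    (m x c : List String) :
    l.foldl (pvStep rd ed) [("missing", m), ("extra", x), ("changed", c)] =
      [("missing", m ++ l.filter (fun p => (rd.get? p).isNone)),
       ("extra", x ++ l.filter (fun p => (rd.get? p).isSome && (ed.get? p).isNone)),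
       ("changed", c ++ l.filter (fun p => (rd.get? p).isSome && (ed.get? p).isSome &&
          (rd.get? p != ed.get? p)))] := by
  induction l generalizing m x c with
  | nil => simp
  | cons p l ih =>
    simp only [List.foldl_cons, List.filter_cons, pvStep]
    cases hr : rd.get? p with
    | none => simp [pvAppendTo, ih]
    | some rv =>
      cases he : ed.get? p with
      | none => simp [pvAppendTo, ih]
      | some ev =>
        by_cases hne : rv = ev <;> simp [pvAppendTo, ih, hne]

-- a sorted nodup list is strictly increasing
theorem pvSorted_pairwise_lt (S : List String) (hS : S.Nodup) :
    (PySem.List.sorted S (fun x => x) false).Pairwise (· < ·) := by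
  have hle := PySem.List.sorted_pairwise (xs := S) (key := fun x => x)
  have hnd : (PySem.List.sorted S (fun x => x) false).Nodup :=
    (PySem.List.sorted_perm (xs := S) (key := fun x => x) (rev := false)).nodup_iff.mpr hS
  exact (hle.and hnd).imp (fun h => lt_of_le_of_ne h.1 h.2)

-- filtering the sorted S equals sorting any nodup list with the same membership as (S, p)
theorem pvFilter_sorted_eq (S : List String) (hS : S.Nodup) (p : String → Bool)
    (T : List String) (hT : T.Nodup) (hmem : ∀ y, y ∈ T ↔ y ∈ S ∧ p y = true) :
    (PySem.List.sorted S (fun x => x) false).filter p =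
      PySem.List.sorted T (fun x => x) false := by
  refine Eq.symm (PySem.List.sorted_eq_of_perm_of_pairwise_lt _ _ (fun x => x) ?_ ?_)
  · refine (List.perm_ext_iff_of_nodup ?_ hT).mpr ?_
    · exact (((PySem.List.sorted_perm (xs := S) (key := fun x => x)
        (rev := false)).nodup_iff.mpr hS)).filter p
    · intro y
      simp only [List.mem_filter, PySem.List.mem_sorted, hmem]
  · exact (pvSorted_pairwise_lt S hS).filter p

-- ===== VERDICT =====
theorem summarize_hash_mismatch_py_spec : Claim_equal_summarize_hash_mismatch_py := by
  intro r e _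
  unfold Spec_summarize_hash_mismatch_py
  unfold summarize_hash_mismatch_py summarize_hash_mismatch_py_alt
  dsimp only
  rw [pvStep_foldl]
  set rd := PySem.Dict.ofList r with hrd
  set ed := PySem.Dict.ofList e with hed
  set U : List String := PySem.Set.union (PySem.Set.ofList rd.keys) (PySem.Set.ofList ed.keys) with hU
  have hUnd : U.Nodup := PySem.Set.nodup_union _ _ (PySem.Set.nodup_ofList _)
  have hmemU : ∀ y, y ∈ U ↔ (rd.contains y = true ∨ ed.contains y = true) := by
    intro y
    simp [hU, PySem.Set.mem_union, PySem.Set.mem_ofList, PySem.Dict.contains_iff_mem_keys]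
  have hMiss :
      (PySem.List.sorted U (fun x => x) false).filter (fun p => (rd.get? p).isNone) =
        PySem.List.sorted
          (PySem.Set.diff (PySem.Set.ofList ed.keys) (PySem.Set.ofList rd.keys)) (fun x => x) false := by
    refine pvFilter_sorted_eq U hUnd _ _ ?_ ?_
    · exact PySem.Set.nodup_diff _ _ (PySem.Set.nodup_ofList _)
    · intro y
      simp only [PySem.Set.mem_diff, PySem.Set.mem_ofList, hmemU,
        ← PySem.Dict.contains_iff_mem_keys, Option.isNone_iff_eq_none]
      cases hec : ed.contains y <;> cases hrc : rd.contains y <;>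
        simp_all [PySem.Dict.contains_eq_isSome_get?, Option.isSome_iff_ne_none]
  have hExtra :
      (PySem.List.sorted U (fun x => x) false).filter
          (fun p => (rd.get? p).isSome && (ed.get? p).isNone) =
        PySem.List.sorted
          (PySem.Set.diff (PySem.Set.ofList rd.keys) (PySem.Set.ofList ed.keys)) (fun x => x) false := by
    refine pvFilter_sorted_eq U hUnd _ _ ?_ ?_
    · exact PySem.Set.nodup_diff _ _ (PySem.Set.nodup_ofList _)
    · intro y
      simp only [PySem.Set.mem_diff, PySem.Set.mem_ofList, hmemU,
        ← PySem.Dict.contains_iff_mem_keys, Bool.and_eq_true, Option.isNone_iff_eq_none]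
      cases hec : ed.contains y <;> cases hrc : rd.contains y <;>
        simp_all [PySem.Dict.contains_eq_isSome_get?, Option.isSome_iff_ne_none]
  have hChanged :
      (PySem.List.sorted U (fun x => x) false).filter
          (fun p => (rd.get? p).isSome && (ed.get? p).isSome && (rd.get? p != ed.get? p)) =
        PySem.List.sorted
          ((PySem.Set.inter (PySem.Set.ofList rd.keys) (PySem.Set.ofList ed.keys)).filter
            (fun p => rd.getD p "" != ed.getD p "")) (fun x => x) false := by
    refine pvFilter_sorted_eq U hUnd _ _ ?_ ?_
    · exact (PySem.Set.nodup_inter _ _ (PySem.Set.nodup_ofList _)).filter _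
    · intro y
      simp only [List.mem_filter, PySem.Set.mem_inter, PySem.Set.mem_ofList, hmemU,
        ← PySem.Dict.contains_iff_mem_keys, Bool.and_eq_true]
      rw [PySem.Dict.getD_eq_get?_getD, PySem.Dict.getD_eq_get?_getD,
        PySem.Dict.contains_eq_isSome_get?, PySem.Dict.contains_eq_isSome_get?]
      cases hr : rd.get? y <;> cases he : ed.get? y <;> simp_all
  rw [hMiss, hExtra, hChanged]
  generalize (PySem.List.sorted ((PySem.Set.ofList ed.keys).diff (PySem.Set.ofList rd.keys)) fun x => x) = m
  generalize (PySem.List.sorted ((PySem.Set.ofList rd.keys).diff (PySem.Set.ofList ed.keys)) fun x => x) = x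
  generalize (PySem.List.sorted
      (List.filter (fun p => rd.getD p "" != ed.getD p "")
        ((PySem.Set.ofList rd.keys).inter (PySem.Set.ofList ed.keys))) fun y => y) = c
  cases m <;> cases x <;> cases c <;> simp [pvShowList_eq_pvReprList]
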